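-- pv_equiv track=rewrite | github.com/neerajakoli/CP | 09-shortenlongruns-Python/shortenlongruns.py | shortenlongruns
-- ===== SOURCE A (Python) =====
-- def shortenlongruns(L, k):
-- 	# Your code goes here
--     l = []
--     count = 0
--     for i in L:
--         if(len(l)==0):
--             l.append(i)
--             count += 1
--         else:
--             if(l[-1]==i and count<k-1):
--                 count += 1
--                 l.append(i)
--             if(l[-1]==i and count==k-1):
--                 continue
--             if(l[-1]!=i):
--                 count = 0
--                 l.append(i)
--                 count += 1
--     return l
-- ===== SOURCE B (Python) =====
-- def shortenlongruns(L, k):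
--     # Group L into maximal runs and emit each run capped at max(k-1, 1) copies.
--     cap = max(k - 1, 1)
--     out = []
--     i, n = 0, len(L)
--     while i < n:
--         j = i + 1
--         while j < n and L[j] == L[i]:
--             j += 1
--         out += [L[i]] * min(j - i, cap)
--         i = j
--     return out
-- ===== Notes on version B (the rewrite author's own statement) =====
-- stated objective: simpler
-- what changed: Replaces A's per-element state machine (last-element comparisons plus a run counter threaded through three sequential ifs) with a group-then-emit pass: find each maximal run, emit min(run length, max(k-1,1)) copies of its value.
import Mathlib
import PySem

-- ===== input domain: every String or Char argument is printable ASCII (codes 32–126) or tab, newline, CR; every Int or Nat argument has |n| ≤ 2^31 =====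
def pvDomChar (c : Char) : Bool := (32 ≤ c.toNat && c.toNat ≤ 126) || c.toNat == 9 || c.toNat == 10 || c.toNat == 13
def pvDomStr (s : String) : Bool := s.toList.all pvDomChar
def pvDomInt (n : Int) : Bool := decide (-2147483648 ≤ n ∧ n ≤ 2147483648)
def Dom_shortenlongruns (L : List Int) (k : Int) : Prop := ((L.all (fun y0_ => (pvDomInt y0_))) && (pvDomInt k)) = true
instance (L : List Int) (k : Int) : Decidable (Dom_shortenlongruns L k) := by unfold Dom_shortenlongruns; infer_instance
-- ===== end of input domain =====

-- B replaces A's per-element last-value/counter state machine with a group-then-emit pass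
-- (each maximal run emitted capped at max(k-1,1) copies); objective: simpler.

-- ===== PORT A =====
-- one iteration of A's for-loop body; state = (l, count); l[-1] on nonempty l is getLast?
def stepA (k : Int) (s : List Int × Int) (i : Int) : List Int × Int :=
  if s.1.length = 0 then (s.1 ++ [i], s.2 + 1)
  else
    -- first if: l[-1]==i and count<k-1
    let s1 := if s.1.getLast? = some i ∧ s.2 < k - 1 then (s.1 ++ [i], s.2 + 1) else s
    -- second if: l[-1]==i and count==k-1 → continue (skip the third if)
    if s1.1.getLast? = some i ∧ s1.2 = k - 1 then s1
    -- third if: l[-1]!=i → count = 0; append; count += 1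
    else if ¬ (s1.1.getLast? = some i) then (s1.1 ++ [i], (0 : Int) + 1)
    else s1

def shortenlongruns (L : List Int) (k : Int) : List Int :=
  (L.foldl (stepA k) ([], 0)).1

-- ===== PORT B =====
-- B scans run by run: the inner while loop finds the maximal run (takeWhile/dropWhile),
-- then emits min(run length, cap) copies of its value.
def altGo (cap : Nat) : List Int → List Int
  | [] => []
  | x :: rest =>
    List.replicate (min ((rest.takeWhile (fun y => y == x)).length + 1) cap) x ++
      altGo cap (rest.dropWhile (fun y => y == x))
termination_by l => l.length
decreasing_by
  simpa using Nat.lt_succ_of_le (List.length_dropWhile_le _ _)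

def shortenlongruns_alt (L : List Int) (k : Int) : List Int :=
  altGo (max (k - 1) 1).toNat L

-- ===== PRECONDITION & SPEC =====
def Spec_shortenlongruns (L : List Int) (k : Int) (out : List Int) : Prop := out = shortenlongruns_alt L k
instance (L : List Int) (k : Int) (out : List Int) : Decidable (Spec_shortenlongruns L k out) := by unfold Spec_shortenlongruns; infer_instance

-- ===== CLAIM (what is proved, stated in full; the proofs are below) =====
def Claim_equal_shortenlongruns : Prop := ∀ (L : List Int) (k : Int), Dom_shortenlongruns L k → Spec_shortenlongruns L k (shortenlongruns L k)

-- ===== LEMMAS AND PROOFS =====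

-- stepA on an element equal to the last of a nonempty accumulator
lemma stepA_same (k : Int) (l : List Int) (c v : Int) (hl : l.getLast? = some v) :
    stepA k (l, c) v = if c < k - 1 then (l ++ [v], c + 1) else (l, c) := by
  have hne : l ≠ [] := by intro h; simp [h] at hl
  unfold stepA
  simp only [List.length_eq_zero_iff]
  rw [if_neg hne]
  by_cases hc : c < k - 1
  · simp [hl, hc]
  · simp [hl, hc]

-- stepA on an element different from the last (or an empty accumulator with count 0)
lemma stepA_new (k : Int) (l : List Int) (c v : Int)
    (h0 : l = [] → c = 0) (hl : l.getLast? ≠ some v) :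
    stepA k (l, c) v = (l ++ [v], 1) := by
  by_cases hne : l = []
  · subst hne; simp [stepA, h0 rfl]
  · unfold stepA
    simp only [List.length_eq_zero_iff]
    rw [if_neg hne]
    simp [hl]

-- processing a run of m copies of v from a state whose accumulator ends in v
lemma runfold (k : Int) : ∀ (m : Nat) (l : List Int) (v c : Int),
    l.getLast? = some v →
    ∃ c', List.foldl (stepA k) (l, c) (List.replicate m v)
      = (l ++ List.replicate (min m (k - 1 - c).toNat) v, c') := by
  intro m
  induction m with
  | zero => intro l v c hl; exact ⟨c, by simp⟩
  | succ m ih =>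
    intro l v c hl
    rw [List.replicate_succ, List.foldl_cons, stepA_same k l c v hl]
    by_cases hc : c < k - 1
    · rw [if_pos hc]
      obtain ⟨c', hc'⟩ := ih (l ++ [v]) v (c + 1) List.getLast?_concat
      refine ⟨c', ?_⟩
      rw [hc']
      have h1 : min (m + 1) (k - 1 - c).toNat = min m (k - 1 - (c + 1)).toNat + 1 := by
        omega
      rw [h1, List.append_assoc]
      simp [List.replicate_succ]
    · rw [if_neg hc]
      obtain ⟨c', hc'⟩ := ih l v c hl
      refine ⟨c', ?_⟩
      have h1 : (k - 1 - c).toNat = 0 := by omega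
      rw [hc']
      simp [h1]

lemma head?_dropWhile_not {p : Int → Bool} : ∀ (l : List Int) (v : Int),
    (l.dropWhile p).head? = some v → p v = false := by
  intro l
  induction l with
  | nil => intro v h; simp at h
  | cons x xs ih =>
    intro v h
    by_cases hx : p x
    · rw [List.dropWhile_cons_of_pos hx] at h; exact ih v h
    · rw [List.dropWhile_cons_of_neg hx] at h
      simp at h
      subst h
      simpa using hx

lemma takeWhile_eq_replicate (x : Int) (l : List Int) :
    l.takeWhile (fun y => y == x)
      = List.replicate (l.takeWhile (fun y => y == x)).length x := by
  apply List.eq_replicate_of_mem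
  intro b hb
  have := List.mem_takeWhile_imp hb
  simpa using this

-- the main invariant: from a state that cannot continue the current run,
-- A's fold appends exactly B's group-then-emit output
lemma mainA (k : Int) : ∀ (n : Nat) (L l : List Int) (c : Int),
    L.length ≤ n →
    (l = [] → c = 0) →
    (∀ v, L.head? = some v → l.getLast? ≠ some v) →
    (List.foldl (stepA k) (l, c) L).1 = l ++ altGo (max (k - 1) 1).toNat L := by
  intro n
  induction n with
  | zero =>
    intro L l c hlen _ _
    have hL : L = [] := by cases L <;> simp_all
    subst hL; simp [altGo]
  | succ n ih =>
    intro L l c hlen h0 hhead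
    match L with
    | [] => simp [altGo]
    | x :: rest =>
      set cap := (max (k - 1) 1).toNat with hcap
      have hcap1 : 1 ≤ cap := by omega
      rw [List.foldl_cons, stepA_new k l c x h0 (hhead x rfl)]
      have hsplit : rest = rest.takeWhile (fun y => y == x) ++ rest.dropWhile (fun y => y == x) :=
        (List.takeWhile_append_dropWhile).symm
      set m := (rest.takeWhile (fun y => y == x)).length with hm
      set rest' := rest.dropWhile (fun y => y == x) with hrest'
      have halt : altGo cap (x :: rest)
          = List.replicate (min (m + 1) cap) x ++ altGo cap rest' := by
        rw [altGo]
      rw [halt, hsplit, takeWhile_eq_replicate x rest, ← hm, List.foldl_append]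
      obtain ⟨c', hc'⟩ := runfold k m (l ++ [x]) x 1 List.getLast?_concat
      rw [hc']
      have hswap : (x :: List.replicate (min m (k - 1 - 1).toNat) x)
          = List.replicate (min m (k - 1 - 1).toNat) x ++ [x] := by
        rw [← List.replicate_succ, List.replicate_succ']
      have hlast : ((l ++ [x]) ++ List.replicate (min m (k - 1 - 1).toNat) x).getLast? = some x := by
        rw [List.append_assoc, List.singleton_append, hswap, ← List.append_assoc]
        exact List.getLast?_concat
      have hhead' : ∀ v, rest'.head? = some v →
          ((l ++ [x]) ++ List.replicate (min m (k - 1 - 1).toNat) x).getLast? ≠ some v := by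
        intro v hv
        have := head?_dropWhile_not rest v hv
        rw [hlast]
        simp at this ⊢
        omega
      have hlen' : rest'.length ≤ n := by
        have h1 : rest'.length ≤ rest.length := List.length_dropWhile_le _ _
        simp at hlen; omega
      rw [ih rest' _ c' hlen' (by intro h; simp at h) hhead']
      have hmin : min (m + 1) cap = min m (k - 1 - 1).toNat + 1 := by omega
      rw [hmin, List.replicate_succ]
      simp

-- ===== VERDICT (by name: the statement is the Claim_ definition above) =====
theorem shortenlongruns_spec : Claim_equal_shortenlongruns := by
  intro L k _
  unfold Spec_shortenlongruns shortenlongruns shortenlongruns_alt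
  exact mainA k L.length L [] 0 le_rfl (fun _ => rfl) (by simp)
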